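-- pv_equiv track=rewrite | github.com/datalab-org/datalab | pydatalab/src/pydatalab/utils/__init__.py | _add_numbering_for_duplicates
-- ===== SOURCE A (Python) =====
-- def _add_numbering_for_duplicates(labels: list[str]) -> list[str]:
--     label_counts: dict[str, int] = {}
--     for label in labels:
--         label_counts[label] = label_counts.get(label, 0) + 1
--
--     if all(count == 1 for count in label_counts.values()):
--         return labels
--
--     label_counter: dict[str, int] = {}
--     numbered_labels = []
--
--     for label in labels:
--         if label_counts[label] > 1:
--             label_counter[label] = label_counter.get(label, 0) + 1
--             numbered_labels.append(f"{label} [{label_counter[label]:02d}]")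
--         else:
--             numbered_labels.append(label)
--
--     return numbered_labels
-- ===== SOURCE B (Python) =====
-- def _add_numbering_for_duplicates(labels: list[str]) -> list[str]:
--     # Group the positions of each label in one enumerate pass, then write the
--     # numbered strings back in place, group by group, by index.
--     positions: dict[str, list[int]] = {}
--     for i, label in enumerate(labels):
--         positions.setdefault(label, []).append(i)
--     if all(len(idxs) == 1 for idxs in positions.values()):
--         return labels
--     result = list(labels)
--     for label, idxs in positions.items():
--         if len(idxs) > 1:
--             for n, i in enumerate(idxs, 1):
--                 result[i] = f"{label} [{n:02d}]"
--     return result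
-- ===== Notes on version B (the rewrite author's own statement) =====
-- stated objective: alternative
-- what changed: Instead of A's second sequential pass with a running per-label counter dict, B builds one dict mapping each label to the list of its positions (single enumerate pass) and then writes the numbered strings back into a copy of the list by index, group by group.
import Mathlib
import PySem

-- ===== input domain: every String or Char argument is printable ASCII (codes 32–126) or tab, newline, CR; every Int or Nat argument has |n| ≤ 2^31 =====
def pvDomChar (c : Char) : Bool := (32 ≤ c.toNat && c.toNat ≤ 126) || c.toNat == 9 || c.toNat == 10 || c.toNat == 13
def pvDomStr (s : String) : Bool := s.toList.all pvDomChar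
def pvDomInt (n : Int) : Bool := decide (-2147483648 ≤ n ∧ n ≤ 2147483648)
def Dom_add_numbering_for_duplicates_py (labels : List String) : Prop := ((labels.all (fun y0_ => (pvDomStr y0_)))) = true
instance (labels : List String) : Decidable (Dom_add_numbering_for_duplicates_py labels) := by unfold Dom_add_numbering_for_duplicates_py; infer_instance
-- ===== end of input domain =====

-- B replaces A's second sequential pass (running counter dict + accumulator list) by a
-- positions-per-label index built in one enumerate pass, writing numbered strings back by
-- index group by group (alternative data flow, same cost). A returns the input list object
-- itself when there are no duplicates; only return VALUES are compared here.

-- f"{n:02d}" for n ≥ 0 (exact there; both Pythons only format n ≥ 1)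
def pvFmt02 (n : Int) : String :=
  if n < 10 then "0" ++ PySem.Int.toStr n else PySem.Int.toStr n

-- ===== PORT A =====
def add_numbering_for_duplicates_py (labels : List String) : List String :=
  let label_counts : PySem.Dict String Int :=
    labels.foldl (fun d label => d.insert label (d.getD label 0 + 1)) PySem.Dict.empty
  if label_counts.values.all (fun count => count == 1) then labels
  else
    (labels.foldl
      (fun (st : PySem.Dict String Int × List String) label =>
        if label_counts.getD label 0 > 1 then
          let ctr := st.1.insert label (st.1.getD label 0 + 1)
          (ctr, st.2 ++ [label ++ " [" ++ pvFmt02 (ctr.getD label 0) ++ "]"])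
        else (st.1, st.2 ++ [label]))
      (PySem.Dict.empty, [])).2

-- ===== PORT B =====
-- result[i] = v is PySem.List.pySetD (exact: every written index comes from enumerate, so in range)
def add_numbering_for_duplicates_py_alt (labels : List String) : List String :=
  let positions : PySem.Dict String (List Int) :=
    (PySem.List.enumerate labels 0).foldl
      (fun d p => d.modify p.2 [] (· ++ [p.1])) PySem.Dict.empty
  if positions.values.all (fun idxs => idxs.length == 1) then labels
  else
    positions.items.foldl
      (fun result li =>
        if 1 < li.2.length then
          (PySem.List.enumerate li.2 1).foldl
            (fun r q => PySem.List.pySetD r q.2 (li.1 ++ " [" ++ pvFmt02 q.1 ++ "]")) result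
        else result)
      labels

-- ===== PRECONDITION & SPEC =====
def Spec_add_numbering_for_duplicates_py (labels : List String) (out : List String) : Prop := out = add_numbering_for_duplicates_py_alt labels
instance (labels : List String) (out : List String) : Decidable (Spec_add_numbering_for_duplicates_py labels out) := by unfold Spec_add_numbering_for_duplicates_py; infer_instance

-- ===== CLAIM (what is proved, stated in full; the proofs are below) =====
def Claim_equal_add_numbering_for_duplicates_py : Prop := ∀ (labels : List String), Dom_add_numbering_for_duplicates_py labels → Spec_add_numbering_for_duplicates_py labels (add_numbering_for_duplicates_py labels)

-- ===== LEMMAS AND PROOFS =====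

-- common description of the output in the duplicate case (used for the A side)
def pvGo (labels : List String) : List String → List String → List String
  | _, [] => []
  | p, x :: l =>
    (if 1 < labels.count x then x ++ " [" ++ pvFmt02 ((p.count x : Int) + 1) ++ "]" else x)
      :: pvGo labels (p ++ [x]) l

lemma pvCond (labels : List String) :
    ((PySem.Dict.counter labels).values.all (fun c => c == 1))
      = (labels.all (fun x => labels.count x == 1)) := by
  have hv : (PySem.Dict.counter labels).values
      = (PySem.Set.ofList labels).map (fun k => (labels.count k : Int)) := by
    show (PySem.Dict.counter labels).items.map (·.2) = _
    rw [PySem.Dict.items_counter, List.map_map]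
    rfl
  rw [hv, List.all_map, Bool.eq_iff_iff]
  simp only [List.all_eq_true, Function.comp, beq_iff_eq]
  constructor
  · intro h x hx
    have := h x ((PySem.Set.mem_ofList _ _).2 hx)
    exact_mod_cast this
  · intro h k hk
    have := h k ((PySem.Set.mem_ofList _ _).1 hk)
    exact_mod_cast this

lemma pvLoopA (labels : List String) (l : List String) :
    ∀ (p : List String) (ctr : PySem.Dict String Int) (acc : List String),
    (∀ x, 1 < labels.count x → ctr.getD x 0 = (p.count x : Int)) →
    (l.foldl
      (fun (st : PySem.Dict String Int × List String) label =>
        if (PySem.Dict.counter labels).getD label 0 > 1 then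
          let ctr := st.1.insert label (st.1.getD label 0 + 1)
          (ctr, st.2 ++ [label ++ " [" ++ pvFmt02 (ctr.getD label 0) ++ "]"])
        else (st.1, st.2 ++ [label]))
      (ctr, acc)).2 = acc ++ pvGo labels p l := by
  induction l with
  | nil => intro p ctr acc _; simp [pvGo]
  | cons x l ih =>
    intro p ctr acc h
    rw [List.foldl_cons]
    have hc : ((PySem.Dict.counter labels).getD x 0 > 1) = (1 < labels.count x) := by
      rw [PySem.Dict.getD_counter]; simp
    by_cases hx : 1 < labels.count x
    · simp only [hc]
      rw [if_pos hx]
      have hinv : ∀ y, 1 < labels.count y →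
          (ctr.insert x (ctr.getD x 0 + 1)).getD y 0 = ((p ++ [x]).count y : Int) := by
        intro y hy
        rw [PySem.Dict.getD_insert]
        by_cases hyx : y = x
        · subst hyx
          rw [if_pos rfl, h y hy]
          simp [List.count_append]
        · rw [if_neg hyx, h y hy]
          simp [List.count_append, List.count_cons]
          exact fun e => hyx e.symm
      rw [ih (p ++ [x]) _ _ hinv, PySem.Dict.getD_insert_self, h x hx, pvGo]
      rw [if_pos hx]
      simp
    · simp only [hc]
      rw [if_neg hx]
      have hinv : ∀ y, 1 < labels.count y → ctr.getD y 0 = ((p ++ [x]).count y : Int) := by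
        intro y hy
        have hyx : ¬ (y = x) := by intro e; subst e; omega
        rw [h y hy]
        simp [List.count_append, List.count_cons]
        exact fun e => hyx e.symm
      rw [ih (p ++ [x]) _ _ hinv, pvGo]
      rw [if_neg hx]
      simp

-- elementwise description of pvGo labels [] labels
lemma pvGoGet (labels : List String) (l : List String) :
    ∀ (p : List String) (j : Nat), p ++ l = labels →
    (pvGo labels p l)[j]? = l[j]?.map (fun x =>
        if 1 < labels.count x then
          x ++ " [" ++ pvFmt02 (((labels.take (p.length + j)).count x : Int) + 1) ++ "]"
        else x) := by
  induction l with
  | nil => intro p j _; simp [pvGo]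
  | cons x l ih =>
    intro p j hp
    cases j with
    | zero =>
      have hpfx : labels.take p.length = p := by rw [← hp]; simp
      simp [pvGo, hpfx]
    | succ j =>
      have := ih (p ++ [x]) j (by simpa using hp)
      simp only [pvGo, List.getElem?_cons_succ]
      rw [this]
      have harith : (p ++ [x]).length + j = p.length + (j + 1) := by simp; omega
      rw [harith]

-- ---------- B-side helpers ----------

-- positions list of a label: indices (as Int) of its occurrences, in order
def pvIdxs (labels : List String) (k : String) : List Int :=
  ((PySem.List.enumerate labels 0).filter (fun p => p.2 == k)).map (·.1)

-- the dict built by B's first pass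
def pvGrp (labels : List String) : PySem.Dict String (List Int) :=
  (PySem.List.enumerate labels 0).foldl
    (fun d p => d.modify p.2 [] (· ++ [p.1])) PySem.Dict.empty

lemma pvGrp_eq_swap (labels : List String) :
    pvGrp labels =
      ((PySem.List.enumerate labels 0).map Prod.swap).foldl
        (fun d p => d.modify p.1 [] (· ++ [p.2])) PySem.Dict.empty := by
  rw [List.foldl_map]; rfl

lemma pvGrp_getD (labels : List String) (k : String) :
    (pvGrp labels).getD k [] = pvIdxs labels k := by
  rw [pvGrp_eq_swap, PySem.Dict.getD_foldl_modify_append]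
  rw [List.filter_map, List.map_map]
  unfold pvIdxs
  rw [PySem.Dict.getD_empty, List.nil_append]
  simp [Function.comp_def]

lemma pvGrp_keys (labels : List String) :
    (pvGrp labels).keys = PySem.Set.ofList labels := by
  unfold pvGrp
  rw [PySem.Dict.keys_foldl_modify_key]
  rw [PySem.List.map_snd_enumerate]
  rw [PySem.Dict.keys_empty, PySem.Set.update_nil_left]

lemma pvGrp_nodup (labels : List String) : (pvGrp labels).keys.Nodup := by
  unfold pvGrp
  exact PySem.Dict.nodup_keys_foldl_modify_key _ _ _ _ _ (by simp [PySem.Dict.keys_empty])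

lemma pvGrp_items (labels : List String) :
    (pvGrp labels).items = (PySem.Set.ofList labels).map (fun k => (k, pvIdxs labels k)) := by
  rw [PySem.Dict.items_eq_map_keys (pvGrp labels) (pvGrp_nodup labels) []]
  rw [pvGrp_keys]
  exact List.map_congr_left (fun k _ => by rw [pvGrp_getD])

lemma pvIdxs_len (labels : List String) (k : String) :
    ∀ (s : Int), (((PySem.List.enumerate labels s).filter (fun p => p.2 == k)).map (·.1)).length
      = labels.count k := by
  induction labels with
  | nil => intro s; simp [PySem.List.enumerate_nil]
  | cons x l ih =>
    intro s
    rw [PySem.List.enumerate_cons, List.filter_cons]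
    by_cases hx : x = k
    · simp only [hx, List.count_cons_self]
      simp [ih (s + 1)]
    · simp [hx, ih (s + 1)]

-- m-th element of the positions list = index of the (m+1)-th occurrence
lemma pvIdxs_spec (k : String) :
    ∀ (l : List String) (s : Int) (m : Nat) (t : Int),
    ((((PySem.List.enumerate l s).filter (fun p => p.2 == k)).map (·.1))[m]? = some t
      ↔ ∃ j : Nat, t = s + j ∧ ∃ h : j < l.length, l[j] = k ∧ (l.take j).count k = m) := by
  intro l
  induction l with
  | nil => intro s m t; simp [PySem.List.enumerate_nil]
  | cons x l ih =>
    intro s m t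
    rw [PySem.List.enumerate_cons, List.filter_cons]
    by_cases hx : x = k
    · subst hx
      simp only [BEq.rfl, if_pos, List.map_cons]
      cases m with
      | zero =>
        simp only [List.getElem?_cons_zero, Option.some.injEq]
        constructor
        · rintro rfl
          exact ⟨0, by simp, by simp, by simp, by simp⟩
        · rintro ⟨j, ht, hj, hk, hc⟩
          cases j with
          | zero => simp at ht; omega
          | succ j =>
            rw [List.take_succ_cons, List.count_cons_self] at hc
            omega
      | succ m =>
        rw [List.getElem?_cons_succ, ih (s + 1) m t]
        constructor
        · rintro ⟨j, ht, hj, hk, hc⟩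
          refine ⟨j + 1, by push_cast; omega, by simp; omega, by simpa using hk, ?_⟩
          rw [List.take_succ_cons, List.count_cons_self, hc]
        · rintro ⟨j, ht, hj, hk, hc⟩
          cases j with
          | zero => simp at hc
          | succ j =>
            refine ⟨j, by push_cast at ht ⊢; omega, by simp at hj; omega, by simpa using hk, ?_⟩
            rw [List.take_succ_cons, List.count_cons_self] at hc
            omega
    · have hbx : ((x : String) == k) = false := by simp [hx]
      rw [hbx, if_neg (by simp), ih (s + 1) m t]
      constructor
      · rintro ⟨j, ht, hj, hk, hc⟩
        refine ⟨j + 1, by push_cast; omega, by simp; omega, by simpa using hk, ?_⟩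
        rw [List.take_succ_cons, List.count_cons_of_ne hx, hc]
      · rintro ⟨j, ht, hj, hk, hc⟩
        cases j with
        | zero => exact absurd hk hx
        | succ j =>
          refine ⟨j, by push_cast at ht ⊢; omega, by simp at hj; omega, by simpa using hk, ?_⟩
          rw [List.take_succ_cons, List.count_cons_of_ne hx] at hc
          exact hc

-- pvIdxs restated: m-th position and length
lemma pvIdxs_get (labels : List String) (k : String) (m : Nat) (t : Int) :
    (pvIdxs labels k)[m]? = some t
      ↔ ∃ j : Nat, t = (j : Int) ∧ ∃ h : j < labels.length, labels[j] = k ∧ (labels.take j).count k = m := by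
  have h := pvIdxs_spec k labels 0 m t
  unfold pvIdxs
  rw [h]
  constructor
  · rintro ⟨j, ht, hj, hk, hc⟩
    exact ⟨j, by omega, hj, hk, hc⟩
  · rintro ⟨j, ht, hj, hk, hc⟩
    exact ⟨j, by omega, hj, hk, hc⟩

lemma pvIdxs_length (labels : List String) (k : String) :
    (pvIdxs labels k).length = labels.count k := pvIdxs_len labels k 0

-- applying a list of writes: length is preserved
lemma pvApply_len (ws : List (Int × String)) :
    ∀ (r0 : List String),
    (ws.foldl (fun r p => PySem.List.pySetD r p.1 p.2) r0).length = r0.length := by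
  induction ws with
  | nil => intro r0; rfl
  | cons p ws ih =>
    intro r0
    rw [List.foldl_cons, ih, PySem.List.length_pySetD]

-- applying writes with nonnegative indices: an index no write touches keeps its value
lemma pvApply_get_none (ws : List (Int × String)) :
    ∀ (r0 : List String) (j : Nat), (∀ p ∈ ws, 0 ≤ p.1) → (∀ p ∈ ws, p.1 ≠ (j : Int)) →
    (ws.foldl (fun r p => PySem.List.pySetD r p.1 p.2) r0)[j]? = r0[j]? := by
  induction ws with
  | nil => intro r0 j _ _; rfl
  | cons p ws ih =>
    intro r0 j hnn hne
    rw [List.foldl_cons, ih _ j (fun q hq => hnn q (by simp [hq])) (fun q hq => hne q (by simp [hq]))]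
    rw [PySem.List.pySetD_of_nonneg _ _ (hnn p (by simp))]
    rw [List.getElem?_set_ne]
    intro h
    apply hne p (by simp)
    rw [← h, Int.toNat_of_nonneg (hnn p (by simp))]

-- applying writes: a uniquely-written in-range index gets its written value
lemma pvApply_get_one (ws : List (Int × String)) :
    ∀ (r0 : List String) (j : Nat) (w0 : Int × String),
    j < r0.length → (∀ p ∈ ws, 0 ≤ p.1) → w0 ∈ ws → w0.1 = (j : Int) →
    (∀ p ∈ ws, p.1 = (j : Int) → p = w0) →
    (ws.foldl (fun r p => PySem.List.pySetD r p.1 p.2) r0)[j]? = some w0.2 := by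
  induction ws with
  | nil => intro r0 j w0 _ _ h; exact absurd h (by simp)
  | cons p ws ih =>
    intro r0 j w0 hj hnn hmem hw0 huniq
    rw [List.foldl_cons]
    by_cases hrest : w0 ∈ ws
    · exact ih _ j w0 (by rw [PySem.List.length_pySetD]; exact hj)
        (fun q hq => hnn q (by simp [hq])) hrest hw0
        (fun q hq h => huniq q (by simp [hq]) h)
    · have hpw : p = w0 := by
        rcases List.mem_cons.mp hmem with h | h
        · exact h.symm
        · exact absurd h hrest
      subst hpw
      have hnone : ∀ q ∈ ws, q.1 ≠ (j : Int) := by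
        intro q hq h
        exact hrest (huniq q (by simp [hq]) h ▸ hq)
      rw [pvApply_get_none ws _ j (fun q hq => hnn q (by simp [hq])) hnone]
      rw [PySem.List.pySetD_of_nonneg _ _ (hnn p (by simp)), hw0]
      simp [hj]

-- foldl over a flatMap = nested foldl
lemma pvFoldl_flatMap {A B C : Type} (l : List A) (f : A → List B) (g : C → B → C) :
    ∀ (init : C), (l.flatMap f).foldl g init = l.foldl (fun c a => (f a).foldl g c) init := by
  induction l with
  | nil => intro init; rfl
  | cons a l ih =>
    intro init
    rw [List.flatMap_cons, List.foldl_append, List.foldl_cons, ih]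

-- the flat write list of B's second phase
def pvGw (_labels : List String) (li : String × List Int) : List (Int × String) :=
  if 1 < li.2.length then
    (PySem.List.enumerate li.2 1).map (fun q => (q.2, li.1 ++ " [" ++ pvFmt02 q.1 ++ "]"))
  else []

def pvW (labels : List String) : List (Int × String) :=
  (pvGrp labels).items.flatMap (pvGw labels)

-- membership in the write list
lemma pvMemW (labels : List String) (p : Int × String) :
    p ∈ pvW labels ↔ ∃ j : Nat, ∃ h : j < labels.length,
      1 < labels.count labels[j] ∧
      p = ((j : Int), labels[j] ++ " [" ++ pvFmt02 (((labels.take j).count labels[j] : Int) + 1) ++ "]") := by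
  unfold pvW
  rw [pvGrp_items, List.flatMap_map, List.mem_flatMap]
  constructor
  · rintro ⟨k, hk, hp⟩
    unfold pvGw at hp
    by_cases hlen : 1 < (pvIdxs labels k).length
    · rw [if_pos (by simpa using hlen), List.mem_map] at hp
      rcases hp with ⟨q, hq, rfl⟩
      rcases (PySem.List.mem_enumerate_iff _ _ _).mp hq with ⟨m, hm, rfl⟩
      have hm' : m < (pvIdxs labels k).length := by simpa using hm
      obtain ⟨j, hjt, hj, hkj, hc⟩ :=
        (pvIdxs_get labels k m _).mp (List.getElem?_eq_getElem hm')
      refine ⟨j, hj, ?_, ?_⟩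
      · rw [hkj, ← pvIdxs_length labels k]
        exact hlen
      · rw [hkj, hc]
        simp only [Prod.mk.injEq]
        refine ⟨by simpa using hjt, ?_⟩
        have harith : (1 + (m : Int)) = (m : Int) + 1 := by ring
        rw [harith]
    · rw [if_neg (by simpa using hlen)] at hp
      exact absurd hp (by simp)
  · rintro ⟨j, hj, hcnt, rfl⟩
    refine ⟨labels[j], (PySem.Set.mem_ofList _ _).mpr (List.getElem_mem hj), ?_⟩
    unfold pvGw
    set k := labels[j] with hkdef
    have hlen : (pvIdxs labels k).length = labels.count k := pvIdxs_length labels k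
    rw [if_pos (by simp only []; omega)]
    rw [List.mem_map]
    set m := (labels.take j).count k with hmdef
    have hm : m < (pvIdxs labels k).length := by
      rw [hlen]
      have hsplit : labels = labels.take j ++ labels.drop j := (List.take_append_drop j labels).symm
      have hdrop : labels.drop j = k :: labels.drop (j + 1) := List.drop_eq_getElem_cons hj
      calc m < m + 1 + (labels.drop (j + 1)).count k := by omega
        _ = labels.count k := by
          conv_rhs => rw [hsplit]
          rw [List.count_append, hdrop, List.count_cons_self]
          omega
    have hget : (pvIdxs labels k)[m]? = some ((j : Int)) :=
      (pvIdxs_get labels k m _).mpr ⟨j, rfl, hj, rfl, rfl⟩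
    have hidx : (pvIdxs labels k)[m] = (j : Int) := by
      have h2 := List.getElem?_eq_getElem hm
      rw [hget] at h2
      exact (Option.some.injEq _ _).mp h2.symm
    refine ⟨(1 + (m : Int), (pvIdxs labels k)[m]), ?_, ?_⟩
    · rw [PySem.List.mem_enumerate_iff]
      exact ⟨m, by simpa using hm, by simp⟩
    · rw [hidx]
      simp only [Prod.mk.injEq]
      refine ⟨by simp, ?_⟩
      have harith : (1 + (m : Int)) = (m : Int) + 1 := by ring
      rw [harith]

-- all write indices are nonnegative
lemma pvW_nonneg (labels : List String) : ∀ p ∈ pvW labels, 0 ≤ p.1 := by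
  intro p hp
  rcases (pvMemW labels p).mp hp with ⟨j, hj, _, rfl⟩
  exact Int.natCast_nonneg j

-- B's guard equals "every label occurs once"
lemma pvGuardB (labels : List String) :
    ((pvGrp labels).values.all (fun idxs => idxs.length == 1))
      = (labels.all (fun x => labels.count x == 1)) := by
  have hv : (pvGrp labels).values
      = (PySem.Set.ofList labels).map (fun k => pvIdxs labels k) := by
    show (pvGrp labels).items.map (·.2) = _
    rw [pvGrp_items, List.map_map]
    rfl
  rw [hv, List.all_map, Bool.eq_iff_iff]
  simp only [List.all_eq_true, Function.comp, beq_iff_eq]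
  constructor
  · intro h x hx
    have := h x ((PySem.Set.mem_ofList _ _).2 hx)
    rw [← pvIdxs_len labels x 0]
    exact this
  · intro h k hk
    rw [show (pvIdxs labels k).length = labels.count k from pvIdxs_len labels k 0]
    exact h k ((PySem.Set.mem_ofList _ _).1 hk)

-- B's second phase equals applying the flat write list
lemma pvPhase2 (labels : List String) :
    (pvGrp labels).items.foldl
      (fun result li =>
        if 1 < li.2.length then
          (PySem.List.enumerate li.2 1).foldl
            (fun r q => PySem.List.pySetD r q.2 (li.1 ++ " [" ++ pvFmt02 q.1 ++ "]")) result
        else result)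
      labels
    = (pvW labels).foldl (fun r p => PySem.List.pySetD r p.1 p.2) labels := by
  unfold pvW
  rw [pvFoldl_flatMap]
  have hfun : (fun (result : List String) (li : String × List Int) =>
        if 1 < li.2.length then
          (PySem.List.enumerate li.2 1).foldl
            (fun r q => PySem.List.pySetD r q.2 (li.1 ++ " [" ++ pvFmt02 q.1 ++ "]")) result
        else result)
      = (fun result li => (pvGw labels li).foldl (fun r p => PySem.List.pySetD r p.1 p.2) result) := by
    funext r li
    unfold pvGw
    by_cases h : 1 < li.2.length
    · rw [if_pos h, if_pos h, List.foldl_map]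
    · rw [if_neg h, if_neg h]
      rfl
  rw [hfun]

-- ===== VERDICT (by name: the statement is the Claim_ definition above) =====
theorem add_numbering_for_duplicates_py_spec : Claim_equal_add_numbering_for_duplicates_py := by
  intro labels _
  unfold Spec_add_numbering_for_duplicates_py
  have hA : add_numbering_for_duplicates_py labels =
      (if ((PySem.Dict.counter labels).values.all fun count => count == 1) = true then labels
       else
         (labels.foldl
           (fun (st : PySem.Dict String Int × List String) label =>
             if (PySem.Dict.counter labels).getD label 0 > 1 then
               let ctr := st.1.insert label (st.1.getD label 0 + 1)
               (ctr, st.2 ++ [label ++ " [" ++ pvFmt02 (ctr.getD label 0) ++ "]"])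
             else (st.1, st.2 ++ [label]))
           (PySem.Dict.empty, [])).2) := rfl
  have hB : add_numbering_for_duplicates_py_alt labels =
      (if ((pvGrp labels).values.all fun idxs => idxs.length == 1) = true then labels
       else
         (pvGrp labels).items.foldl
           (fun result li =>
             if 1 < li.2.length then
               (PySem.List.enumerate li.2 1).foldl
                 (fun r q => PySem.List.pySetD r q.2 (li.1 ++ " [" ++ pvFmt02 q.1 ++ "]")) result
             else result)
           labels) := rfl
  rw [hA, hB, pvCond, pvGuardB]
  by_cases hall : (labels.all (fun x => labels.count x == 1)) = true
  · rw [if_pos hall, if_pos hall]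
  · rw [if_neg hall, if_neg hall]
    rw [pvLoopA labels labels [] PySem.Dict.empty [] (by intro x _; simp), List.nil_append,
        pvPhase2]
    apply List.ext_getElem?
    intro j
    rw [pvGoGet labels labels [] j rfl]
    by_cases hj : j < labels.length
    · set x := labels[j] with hxdef
      have hget : labels[j]? = some x := List.getElem?_eq_getElem hj
      by_cases hcnt : 1 < labels.count x
      · set w0 : Int × String :=
          ((j : Int), x ++ " [" ++ pvFmt02 (((labels.take j).count x : Int) + 1) ++ "]") with hw0
        have hw0mem : w0 ∈ pvW labels := (pvMemW labels w0).mpr ⟨j, hj, hcnt, rfl⟩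
        have huniq : ∀ p ∈ pvW labels, p.1 = (j : Int) → p = w0 := by
          intro p hp hpj
          rcases (pvMemW labels p).mp hp with ⟨j2, hj2, _, rfl⟩
          simp only at hpj
          have : j2 = j := by exact_mod_cast hpj
          subst this
          rfl
        rw [pvApply_get_one (pvW labels) labels j w0 hj (pvW_nonneg labels) hw0mem rfl huniq]
        rw [hget]
        simp only [Option.map_some]
        rw [if_pos hcnt]
        simp
        rw [hw0]
      · have hnone : ∀ p ∈ pvW labels, p.1 ≠ (j : Int) := by
          intro p hp hpj
          rcases (pvMemW labels p).mp hp with ⟨j2, hj2, hc2, rfl⟩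
          simp only at hpj
          have : j2 = j := by exact_mod_cast hpj
          subst this
          exact hcnt hc2
        rw [pvApply_get_none (pvW labels) labels j (pvW_nonneg labels) hnone, hget]
        simp only [Option.map_some]
        rw [if_neg hcnt]
    · have h1 : labels[j]? = none := List.getElem?_eq_none (by omega)
      have h2 : ((pvW labels).foldl (fun r p => PySem.List.pySetD r p.1 p.2) labels)[j]? = none := by
        apply List.getElem?_eq_none
        rw [pvApply_len]
        omega
      rw [h1, h2]
      rfl
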